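-- pv_equiv track=rewrite | github.com/SystemLight/madtornado | madtornado/ancient/rig/iso7064.py | iso7064mod11_2
-- ===== SOURCE A (Python) =====
-- def iso7064mod11_2(source: str) -> str:
--     """
--
--     iso7064mod11-2校验算法
--
--     :param source: 需要添加校验的字符串
--     :return: 校验位
--
--     """
--     sigma = 0
--     size = len(source)
--     index = 0
--     for i in source:
--         weight = (2 ** (size - index)) % 11
--         sigma += (ord(i) - 48) * weight
--         index += 1
--     sigma %= 11
--     sigma = ((12 - sigma) % 11)
--     return "X" if sigma == 10 else chr(48 + sigma)
-- ===== SOURCE B (Python) =====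
-- def iso7064mod11_2(source: str) -> str:
--     # Back-to-front pass: running weight w = 2,4,8,... (mod 11) replaces
--     # A's per-character bigint power 2**(size-index); sigma kept reduced mod 11.
--     sigma = 0
--     w = 2
--     for c in reversed(source):
--         sigma = (sigma + (ord(c) - 48) * w) % 11
--         w = w * 2 % 11
--     sigma = (12 - sigma) % 11
--     return "X" if sigma == 10 else chr(48 + sigma)
-- ===== Notes on version B (the rewrite author's own statement) =====
-- stated objective: faster
-- what changed: Traverses the string back-to-front maintaining an incremental running weight w = w*2 % 11 (sigma kept reduced mod 11), instead of A's forward pass computing a fresh bigint power 2**(size-index) % 11 for every character.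
import Mathlib
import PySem

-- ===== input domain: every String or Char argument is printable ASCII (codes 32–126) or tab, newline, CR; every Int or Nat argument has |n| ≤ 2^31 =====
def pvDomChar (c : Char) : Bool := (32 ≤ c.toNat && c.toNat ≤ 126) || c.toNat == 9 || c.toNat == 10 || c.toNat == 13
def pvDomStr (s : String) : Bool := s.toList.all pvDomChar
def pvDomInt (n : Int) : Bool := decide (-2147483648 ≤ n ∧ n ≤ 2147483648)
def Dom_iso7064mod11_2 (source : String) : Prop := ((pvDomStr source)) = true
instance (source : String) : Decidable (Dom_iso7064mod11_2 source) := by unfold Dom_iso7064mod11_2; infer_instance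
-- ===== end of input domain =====

-- B traverses back-to-front with an incremental running weight (w = w*2 % 11) instead of
-- A's fresh bigint power 2**(size-index) % 11 per character (faster); same return value.

-- ===== PORT A =====
-- loop 'for i in source' carrying (sigma, index); size fixed
def isoLoopA (size : Int) : List Char → Int → Int → Int
  | [], sigma, _ => sigma
  | c :: t, sigma, index =>
      isoLoopA size t (sigma + ((c.toNat : Int) - 48) * (PySem.Int.mod ((2 : Int) ^ (size - index).toNat) 11)) (index + 1)

def iso7064mod11_2 (source : String) : String :=
  let sigma := isoLoopA (source.toList.length : Int) source.toList 0 0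
  let sigma := PySem.Int.mod sigma 11
  let sigma := PySem.Int.mod (12 - sigma) 11
  if sigma = 10 then "X" else String.ofList [Char.ofNat (48 + sigma).toNat]

-- ===== PORT B =====
-- one 'for c in reversed(source)' step on the state (sigma, w)
def isoStepB (p : Int × Int) (c : Char) : Int × Int :=
  (PySem.Int.mod (p.1 + ((c.toNat : Int) - 48) * p.2) 11, PySem.Int.mod (p.2 * 2) 11)

def iso7064mod11_2_alt (source : String) : String :=
  let sigma := (source.toList.reverse.foldl isoStepB (0, 2)).1
  let sigma := PySem.Int.mod (12 - sigma) 11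
  if sigma = 10 then "X" else String.ofList [Char.ofNat (48 + sigma).toNat]

-- ===== PRECONDITION & SPEC =====
def Spec_iso7064mod11_2 (source : String) (out : String) : Prop := out = iso7064mod11_2_alt source
instance (source : String) (out : String) : Decidable (Spec_iso7064mod11_2 source out) := by unfold Spec_iso7064mod11_2; infer_instance

-- ===== CLAIM =====
def Claim_equal_iso7064mod11_2 : Prop := ∀ (source : String), Dom_iso7064mod11_2 source → Spec_iso7064mod11_2 source (iso7064mod11_2 source)

-- ===== LEMMAS AND PROOFS =====

-- B's weight component: starting from a reduced w, after ys it is w * 2^|ys| mod 11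
theorem isoW : ∀ (ys : List Char) (s w : Int), w % 11 = w →
    (ys.foldl isoStepB (s, w)).2 = w * 2 ^ ys.length % 11 := by
  intro ys
  induction ys with
  | nil => intro s w h; simpa using h.symm
  | cons c t ih =>
      intro s w _
      have hpos : (0:Int) < 11 := by norm_num
      simp only [List.foldl_cons, isoStepB, PySem.Int.mod_eq_emod_of_pos hpos]
      rw [ih _ _ (Int.emod_emod_of_dvd _ (dvd_refl 11))]
      rw [Int.mul_emod, Int.emod_emod_of_dvd _ (dvd_refl 11), ← Int.mul_emod,
        List.length_cons, pow_succ]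
      ring_nf

-- B's sigma component stays reduced
theorem isoS : ∀ (ys : List Char) (s w : Int), s % 11 = s →
    ((ys.foldl isoStepB (s, w)).1) % 11 = (ys.foldl isoStepB (s, w)).1 := by
  intro ys
  induction ys with
  | nil => intro s w h; simpa using h
  | cons c t ih =>
      intro s w _
      have hpos : (0:Int) < 11 := by norm_num
      simp only [List.foldl_cons, isoStepB, PySem.Int.mod_eq_emod_of_pos hpos]
      exact ih _ _ (Int.emod_emod_of_dvd _ (dvd_refl 11))

-- main invariant: A's forward loop agrees mod 11 with s plus B's backward fold
theorem isoMain : ∀ (l : List Char) (size s index : Int),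
    size - index = (l.length : Int) →
    isoLoopA size l s index % 11 = (s + (l.reverse.foldl isoStepB (0, 2)).1) % 11 := by
  intro l
  induction l with
  | nil => intro size s index _; simp [isoLoopA]
  | cons c t ih =>
      intro size s index hlen
      have hpos : (0:Int) < 11 := by norm_num
      have hk : (size - index).toNat = t.length + 1 := by
        simp at hlen; omega
      simp only [isoLoopA, List.reverse_cons, List.foldl_append, List.foldl_cons,
        List.foldl_nil, isoStepB, PySem.Int.mod_eq_emod_of_pos hpos]
      rw [ih size _ (index + 1) (by simp at hlen ⊢; omega), hk]
      set F := (t.reverse.foldl isoStepB (0, 2)).1 with hF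
      have hW : (t.reverse.foldl isoStepB (0, 2)).2 = 2 * 2 ^ t.length % 11 := by
        rw [isoW t.reverse 0 2 (by norm_num)]; simp
      rw [hW]
      set d := ((c.toNat : Int) - 48) with hd
      have hadd : ∀ (a b : Int), (a + b % 11) % 11 = (a + b) % 11 := by
        intro a b
        rw [Int.add_emod, Int.emod_emod_of_dvd _ (dvd_refl 11), ← Int.add_emod]
      have hmul : ∀ (a b e : Int), (a + e * (b % 11)) % 11 = (a + e * b) % 11 := by
        intro a b e
        rw [Int.add_emod, Int.mul_emod e, Int.emod_emod_of_dvd _ (dvd_refl 11),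
          ← Int.mul_emod, ← Int.add_emod]
      have hL : (s + d * ((2:Int) ^ (t.length + 1) % 11) + F) % 11
          = (s + F + d * 2 ^ (t.length + 1)) % 11 := by
        rw [show s + d * ((2:Int) ^ (t.length + 1) % 11) + F
            = (s + F) + d * ((2:Int) ^ (t.length + 1) % 11) from by ring, hmul]
      have hR : (s + (F + d * ((2:Int) * 2 ^ t.length % 11)) % 11) % 11
          = (s + F + d * (2 * 2 ^ t.length)) % 11 := by
        rw [hadd, show s + (F + d * ((2:Int) * 2 ^ t.length % 11))
            = (s + F) + d * ((2:Int) * 2 ^ t.length % 11) from by ring, hmul]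
      rw [hL, hR, pow_succ]
      ring_nf

theorem iso7064mod11_2_spec : Claim_equal_iso7064mod11_2 := by
  intro source _
  unfold Spec_iso7064mod11_2 iso7064mod11_2 iso7064mod11_2_alt
  have hpos : (0:Int) < 11 := by norm_num
  have hmain := isoMain source.toList (source.toList.length : Int) 0 0 (by simp)
  have hred := isoS source.toList.reverse 0 2 (by norm_num)
  simp only [PySem.Int.mod_eq_emod_of_pos hpos]
  rw [hmain]
  rw [zero_add, hred]
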